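-- pv_equiv track=rewrite | github.com/MelonLabs-prog/vocab-analyzer-backend | cefr_classifier.py | _group_by_level
-- ===== SOURCE A (Python) =====
-- def _group_by_level(classifications):
--     """
--     Group classifications by CEFR level
--
--     Args:
--         classifications: Dict of word classifications
--
--     Returns:
--         dict: Words grouped by level
--     """
--     grouped = {
--         'A1': [],
--         'A2': [],
--         'B1': [],
--         'B2': [],
--         'C1': [],
--         'C2': []
--     }
--
--     for word, data in classifications.items():
--         level = data.get('level', 'A1')
--         grouped[level].append({
--             'word': word,
--             'reason': data.get('reason', '')
--         })
--
--     # Sort words alphabetically within each level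
--     for level in grouped:
--         grouped[level] = sorted(grouped[level], key=lambda x: x['word'])
--
--     return grouped
-- ===== SOURCE B (Python) =====
-- def _group_by_level(classifications):
--     """Group word classifications by CEFR level, alphabetically within each level.
--
--     One sort of the items up front; each level's bucket is then a single
--     filtering pass (no per-bucket sort, no mutation of a shared dict).
--     """
--     items = sorted(classifications.items(), key=lambda kv: kv[0])
--     return {
--         level: [
--             {'word': word, 'reason': data.get('reason', '')}
--             for word, data in items
--             if data.get('level', 'A1') == level
--         ]
--         for level in ('A1', 'A2', 'B1', 'B2', 'C1', 'C2')
--     }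
-- ===== Notes on version B (the rewrite author's own statement) =====
-- stated objective: simpler
-- what changed: A appends each word into one of six mutable buckets and then sorts every bucket; B sorts the items once up front and builds each level's bucket as a single filter comprehension, so the per-bucket sort step and the mutation disappear.
import Mathlib
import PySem

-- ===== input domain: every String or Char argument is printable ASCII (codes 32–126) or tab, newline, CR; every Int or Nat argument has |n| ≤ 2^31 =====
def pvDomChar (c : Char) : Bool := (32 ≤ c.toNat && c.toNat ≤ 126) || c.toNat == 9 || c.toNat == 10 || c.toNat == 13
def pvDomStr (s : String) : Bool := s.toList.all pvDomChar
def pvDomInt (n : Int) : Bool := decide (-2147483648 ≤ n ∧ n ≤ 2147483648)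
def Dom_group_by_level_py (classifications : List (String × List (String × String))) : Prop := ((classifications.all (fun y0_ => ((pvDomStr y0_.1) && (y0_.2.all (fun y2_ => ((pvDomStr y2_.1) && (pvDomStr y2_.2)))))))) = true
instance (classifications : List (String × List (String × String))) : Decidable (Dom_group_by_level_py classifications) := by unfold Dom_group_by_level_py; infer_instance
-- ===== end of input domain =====

-- B replaces A's "append into six buckets, then sort each bucket" by "sort the items once,
-- then build each level's bucket by a single filter" — same result, simpler decomposition.

-- ===== PORT A =====
def pvLevelA (data : List (String × String)) : String :=
  (PySem.Dict.ofList data).getD "level" "A1"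

def pvEntryA (word : String) (data : List (String × String)) : List (String × String) :=
  [("word", word), ("reason", (PySem.Dict.ofList data).getD "reason" "")]

def pvWordKeyA (x : List (String × String)) : String :=
  (PySem.Dict.ofList x).getD "word" ""

def pvGrouped0 : PySem.Dict String (List (List (String × String))) :=
  PySem.Dict.ofList [("A1", []), ("A2", []), ("B1", []), ("B2", []), ("C1", []), ("C2", [])]

def group_by_level_py (classifications : List (String × List (String × String))) :
    List (String × List (List (String × String))) :=
  -- for word, data in classifications.items(): grouped[level].append({...})
  -- then: for level in grouped: grouped[level] = sorted(grouped[level], key=lambda x: x['word'])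
  -- (overwriting an existing key keeps its position, so the second loop is a map over the items)
  (classifications.foldl
      (fun g p => g.modify (pvLevelA p.2) [] (fun b => b ++ [pvEntryA p.1 p.2]))
      pvGrouped0).items.map
    (fun kv => (kv.1, PySem.List.sorted kv.2 pvWordKeyA false))

-- ===== PORT B =====
def group_by_level_py_alt (classifications : List (String × List (String × String))) :
    List (String × List (List (String × String))) :=
  (["A1", "A2", "B1", "B2", "C1", "C2"] : List String).map (fun level =>
    (level,
      ((PySem.List.sorted classifications (fun kv => kv.1) false).filter (fun p => (PySem.Dict.ofList p.2).getD "level" "A1" == level)).map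
        (fun p => [("word", p.1), ("reason", (PySem.Dict.ofList p.2).getD "reason" "")])))

-- ===== PRECONDITION & SPEC =====
-- Pre_ excludes (a) assoc lists with duplicate word keys, on which the assoc-list/dict
-- correspondence is ambiguous (a Python dict cannot hold them), and (b) inputs whose
-- effective level value is outside A1..C2, on which A raises KeyError.
def Pre_group_by_level_py (classifications : List (String × List (String × String))) : Prop :=
  (classifications.map Prod.fst).Nodup ∧
  ∀ p ∈ classifications,
    (PySem.Dict.ofList p.2).getD "level" "A1" ∈ (["A1", "A2", "B1", "B2", "C1", "C2"] : List String)

instance (classifications : List (String × List (String × String))) : Decidable (Pre_group_by_level_py classifications) := by unfold Pre_group_by_level_py; infer_instance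

def pvWitness_group_by_level_py : (List (String × List (String × String))) :=
  [("berate", [("level", "C1"), ("reason", "rare verb")]), ("a", [])]

def Spec_group_by_level_py (classifications : List (String × List (String × String))) (out : List (String × List (List (String × String)))) : Prop := out = group_by_level_py_alt classifications
instance (classifications : List (String × List (String × String))) (out : List (String × List (List (String × String)))) : Decidable (Spec_group_by_level_py classifications out) := by unfold Spec_group_by_level_py; infer_instance

-- ===== CLAIM (what is proved, stated in full; the proofs are below) =====
def Claim_equal_group_by_level_py : Prop := ∀ (classifications : List (String × List (String × String))), Dom_group_by_level_py classifications → Pre_group_by_level_py classifications → Spec_group_by_level_py classifications (group_by_level_py classifications)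

-- ===== LEMMAS AND PROOFS =====

theorem pvWordKey_entry (w : String) (d : List (String × String)) :
    pvWordKeyA (pvEntryA w d) = w := rfl

-- the starting dict maps every key (present or not) to []
theorem pvGrouped0_getD (k : String) : pvGrouped0.getD k [] = [] := by
  have h : pvGrouped0 = { items := [("A1", []), ("A2", []), ("B1", []), ("B2", []), ("C1", []),
      ("C2", ([] : List (List (String × String))))] } := rfl
  rw [h, PySem.Dict.getD_eq_get?_getD]
  simp only [PySem.Dict.get?_mk_cons]
  split_ifs <;> rfl

-- one bucket: sorting the filtered entries = filtering the sorted items, given distinct words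
theorem pv_bucket_eq (cs : List (String × List (String × String)))
    (hnd : (cs.map Prod.fst).Nodup) (k : String) :
    PySem.List.sorted ((cs.filter (fun p => pvLevelA p.2 == k)).map (fun p => pvEntryA p.1 p.2))
        pvWordKeyA false
      = ((PySem.List.sorted cs (fun p => p.1) false).filter (fun p => pvLevelA p.2 == k)).map
          (fun p => pvEntryA p.1 p.2) := by
  apply PySem.List.sorted_eq_of_perm_of_pairwise_lt
  · exact ((PySem.List.sorted_perm cs (fun p => p.1) false).filter _).map _
  · rw [List.pairwise_map]
    simp only [pvWordKey_entry]
    apply List.Pairwise.filter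
    have h1 := PySem.List.sorted_pairwise cs (fun p => p.1)
    have h2 : ((PySem.List.sorted cs (fun p => p.1) false).map Prod.fst).Nodup :=
      (((PySem.List.sorted_perm cs (fun p => p.1) false).map Prod.fst).nodup_iff).mpr hnd
    rw [List.Nodup, List.pairwise_map] at h2
    exact (h1.and h2).imp (fun h => lt_of_le_of_ne h.1 h.2)

theorem pv_keys_eq (cs : List (String × List (String × String)))
    (hlvl : ∀ p ∈ cs, pvLevelA p.2 ∈ (["A1", "A2", "B1", "B2", "C1", "C2"] : List String)) :
    (cs.foldl (fun g p => g.modify (pvLevelA p.2) [] (fun b => b ++ [pvEntryA p.1 p.2]))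
        pvGrouped0).keys = ["A1", "A2", "B1", "B2", "C1", "C2"] := by
  have h := PySem.Dict.keys_foldl_modify_key cs (fun p => pvLevelA p.2) []
      (fun _ p => fun b => b ++ [pvEntryA p.1 p.2]) pvGrouped0
  rw [h, PySem.Set.update_eq_append_filter]
  have hk : pvGrouped0.keys = ["A1", "A2", "B1", "B2", "C1", "C2"] := rfl
  rw [hk]
  have : (PySem.Set.ofList (cs.map (fun p => pvLevelA p.2))).filter
      (fun y => !(PySem.Set.contains (["A1", "A2", "B1", "B2", "C1", "C2"] : List String) y)) = [] := by
    rw [List.filter_eq_nil_iff]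
    intro y hy
    rw [PySem.Set.mem_ofList, List.mem_map] at hy
    obtain ⟨p, hp, rfl⟩ := hy
    have := hlvl p hp
    have hc : PySem.Set.contains (["A1", "A2", "B1", "B2", "C1", "C2"] : List String) (pvLevelA p.2) = true :=
      (PySem.Set.contains_iff _ _).mpr this
    simp only [hc, Bool.not_true, Bool.false_eq_true, not_false_eq_true]
  rw [this, List.append_nil]

-- the fold over pairs, rephrased through the mapped list so the append lemma applies
theorem pv_getD_fold (cs : List (String × List (String × String))) (c : String) :
    (cs.foldl (fun g p => g.modify (pvLevelA p.2) [] (fun b => b ++ [pvEntryA p.1 p.2]))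
        pvGrouped0).getD c []
      = (cs.filter (fun p => pvLevelA p.2 == c)).map (fun p => pvEntryA p.1 p.2) := by
  have hm : cs.foldl (fun g p => g.modify (pvLevelA p.2) [] (fun b => b ++ [pvEntryA p.1 p.2]))
        pvGrouped0
      = (cs.map (fun p => (pvLevelA p.2, pvEntryA p.1 p.2))).foldl
          (fun g q => g.modify q.1 [] (fun b => b ++ [q.2])) pvGrouped0 := by
    rw [List.foldl_map]
  rw [hm, PySem.Dict.getD_foldl_modify_append, pvGrouped0_getD, List.nil_append,
      List.filter_map]
  rw [List.map_map]
  rfl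

-- ===== VERDICT (by name: the statement is the Claim_ definition above) =====
theorem group_by_level_py_spec : Claim_equal_group_by_level_py := by
  intro cs _ hpre
  obtain ⟨hnd, hlvl⟩ := hpre
  show group_by_level_py cs = group_by_level_py_alt cs
  unfold group_by_level_py group_by_level_py_alt
  have hkeys := pv_keys_eq cs hlvl
  have hnodup : (cs.foldl (fun g p => g.modify (pvLevelA p.2) [] (fun b => b ++ [pvEntryA p.1 p.2]))
      pvGrouped0).keys.Nodup := by
    rw [hkeys]; decide
  rw [PySem.Dict.items_eq_map_keys _ hnodup [], hkeys, List.map_map]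
  apply List.map_congr_left
  intro k _
  simp only [Function.comp]
  rw [pv_getD_fold cs k, pv_bucket_eq cs hnd k]
  rfl
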